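-- pv_equiv track=rewrite | github.com/SchroederBen/ABJW-Bets | AI/NBA_APIs.py | pick_preferred_book
-- ===== SOURCE A (Python) =====
-- def pick_preferred_book(books):
--     """
--     Prefer BetMGM US first.
--     If not available, fall back to FanDuel US.
--     Then first available.
--     """
--     if not books:
--         return None
--
--     for book in books:
--         if book.get("name") == "BetMGM" and book.get("countryCode") == "US":
--             return book
--
--     for book in books:
--         if book.get("name") == "FanDuel" and book.get("countryCode") == "US":
--             return book
--
--     return books[0]
-- ===== SOURCE B (Python) =====
-- def pick_preferred_book(books):
--     if not books:
--         return None
--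
--     def score(book):
--         if book.get("countryCode") == "US":
--             if book.get("name") == "BetMGM":
--                 return 0
--             if book.get("name") == "FanDuel":
--                 return 1
--         return 2
--
--     return min(books, key=score)
-- ===== Notes on version B (the rewrite author's own statement) =====
-- stated objective: idiomatic
-- what changed: Replaces A's two sequential priority scans plus books[0] fallback with a single min(books, key=score) pass over a 3-level scoring function; Python's min keeps the first minimal element, reproducing A's tie-breaking.
import Mathlib
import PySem

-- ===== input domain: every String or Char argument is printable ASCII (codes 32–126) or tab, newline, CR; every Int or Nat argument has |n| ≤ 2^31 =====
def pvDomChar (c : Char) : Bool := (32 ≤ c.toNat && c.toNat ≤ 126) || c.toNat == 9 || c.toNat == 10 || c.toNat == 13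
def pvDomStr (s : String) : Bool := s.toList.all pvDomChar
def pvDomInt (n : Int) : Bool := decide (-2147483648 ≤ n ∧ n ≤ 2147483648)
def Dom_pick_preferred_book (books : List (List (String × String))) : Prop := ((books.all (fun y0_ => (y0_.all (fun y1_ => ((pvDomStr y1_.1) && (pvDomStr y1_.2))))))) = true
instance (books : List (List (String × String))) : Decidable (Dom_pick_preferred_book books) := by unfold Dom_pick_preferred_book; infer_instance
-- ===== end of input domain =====

-- B replaces A's two sequential priority scans (+ books[0] fallback) with a single
-- min-by-score pass; same O(n) cost, more idiomatic (objective: idiomatic).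

-- ===== PORT A =====
-- book.get(k): first-match lookup in the association list (Python dict → assoc list)
def pvGet (b : List (String × String)) (k : String) : Option String :=
  match b with
  | [] => none
  | (k', v) :: t => if k' == k then some v else pvGet t k

-- first 'for' loop of A: return the first BetMGM/US book
def pvScan1 : List (List (String × String)) → Option (List (String × String))
  | [] => none
  | b :: t =>
      if pvGet b "name" == some "BetMGM" && pvGet b "countryCode" == some "US" then some b
      else pvScan1 t

-- second 'for' loop of A: return the first FanDuel/US book
def pvScan2 : List (List (String × String)) → Option (List (String × String))
  | [] => none
  | b :: t =>
      if pvGet b "name" == some "FanDuel" && pvGet b "countryCode" == some "US" then some b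
      else pvScan2 t

def pick_preferred_book (books : List (List (String × String))) : Option (List (String × String)) :=
  if books.isEmpty then none
  else
    match pvScan1 books with
    | some b => some b
    | none =>
      match pvScan2 books with
      | some b => some b
      | none => books.head?   -- books[0]; books is nonempty here, so head? = some books[0]

-- ===== PORT B =====
-- Source B's score(book)
def pvScore (b : List (String × String)) : Int :=
  if pvGet b "countryCode" == some "US" then
    if pvGet b "name" == some "BetMGM" then 0
    else if pvGet b "name" == some "FanDuel" then 1
    else 2
  else 2

def pick_preferred_book_alt (books : List (List (String × String))) : Option (List (String × String)) :=
  if books.isEmpty then none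
  else PySem.List.min? books pvScore   -- min(books, key=score): first minimal element

-- ===== PRECONDITION & SPEC =====
def Spec_pick_preferred_book (books : List (List (String × String))) (out : Option (List (String × String))) : Prop := out = pick_preferred_book_alt books
instance (books : List (List (String × String))) (out : Option (List (String × String))) : Decidable (Spec_pick_preferred_book books out) := by unfold Spec_pick_preferred_book; infer_instance

-- ===== CLAIM (what is proved, stated in full; the proofs are below) =====
def Claim_equal_pick_preferred_book : Prop := ∀ (books : List (List (String × String))), Dom_pick_preferred_book books → Spec_pick_preferred_book books (pick_preferred_book books)

-- ===== LEMMAS AND PROOFS =====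

-- the value A computes once the list is known nonempty, with m the element already consumed
-- by the fold and t the rest of the list
def pvSelect (m : List (String × String)) (t : List (List (String × String))) : List (String × String) :=
  if pvScore m = 0 then m
  else
    match pvScan1 t with
    | some x => x
    | none =>
      if pvScore m = 1 then m
      else
        match pvScan2 t with
        | some x => x
        | none => m

lemma pvScore_nonneg (b : List (String × String)) : 0 ≤ pvScore b := by
  unfold pvScore; split_ifs <;> norm_num

lemma pvScore_cases (b : List (String × String)) :
    pvScore b = 0 ∨ pvScore b = 1 ∨ pvScore b = 2 := by
  unfold pvScore; split_ifs <;> norm_num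

lemma pvScore_eq_zero_iff (b : List (String × String)) :
    pvScore b = 0 ↔ (pvGet b "name" == some "BetMGM" && pvGet b "countryCode" == some "US") = true := by
  unfold pvScore
  rcases h1 : (pvGet b "countryCode" == some "US") with _ | _ <;>
    rcases h2 : (pvGet b "name" == some "BetMGM") with _ | _ <;>
    rcases h3 : (pvGet b "name" == some "FanDuel") with _ | _ <;>
    simp

lemma pvScore_eq_one_iff (b : List (String × String)) :
    pvScore b = 1 ↔ (pvGet b "name" == some "FanDuel" && pvGet b "countryCode" == some "US") = true := by
  unfold pvScore
  rcases h1 : (pvGet b "countryCode" == some "US") with _ | _ <;>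
    rcases h2 : (pvGet b "name" == some "BetMGM") with _ | _ <;>
    rcases h3 : (pvGet b "name" == some "FanDuel") with _ | _ <;>
    simp
  · -- name == BetMGM and name == FanDuel simultaneously: impossible
    have e2 : pvGet b "name" = some "BetMGM" := by simpa using h2
    have e3 : pvGet b "name" = some "FanDuel" := by simpa using h3
    rw [e2] at e3; simp at e3

lemma pvScan1_cons (b : List (String × String)) (t : List (List (String × String))) :
    pvScan1 (b :: t) =
      (if pvScore b = 0 then some b else pvScan1 t) := by
  rw [pvScan1]
  by_cases h : pvScore b = 0
  · simp [h, (pvScore_eq_zero_iff b).mp h]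
  · have : ¬ (pvGet b "name" == some "BetMGM" && pvGet b "countryCode" == some "US") = true := by
      intro hc; exact h ((pvScore_eq_zero_iff b).mpr hc)
    simp [h, this]

lemma pvScan2_cons (b : List (String × String)) (t : List (List (String × String))) :
    pvScan2 (b :: t) =
      (if pvScore b = 1 then some b else pvScan2 t) := by
  rw [pvScan2]
  by_cases h : pvScore b = 1
  · simp [h, (pvScore_eq_one_iff b).mp h]
  · have : ¬ (pvGet b "name" == some "FanDuel" && pvGet b "countryCode" == some "US") = true := by
      intro hc; exact h ((pvScore_eq_one_iff b).mpr hc)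
    simp [h, this]

-- one fold step of min? absorbs the head pair into a single running minimum
lemma min?_cons_cons (m x : List (String × String)) (t : List (List (String × String))) :
    PySem.List.min? (m :: x :: t) pvScore
      = PySem.List.min? ((if pvScore x < pvScore m then x else m) :: t) pvScore := by
  unfold PySem.List.min?
  by_cases h : pvScore x < pvScore m <;> simp [h]

-- min? over a nonempty list computes A's selection pvSelect
lemma min?_cons_select (t : List (List (String × String))) :
    ∀ m, PySem.List.min? (m :: t) pvScore = some (pvSelect m t) := by
  induction t with
  | nil =>
      intro m
      unfold PySem.List.min? pvSelect
      simp [pvScan1, pvScan2]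
  | cons x t ih =>
      intro m
      rw [min?_cons_cons]
      rcases pvScore_cases m with hm | hm | hm
      · -- m already optimal: x never replaces it
        have hx : ¬ pvScore x < pvScore m := by
          rw [hm]; exact not_lt.mpr (pvScore_nonneg x)
        rw [if_neg hx, ih m]
        all_goals simp [pvSelect, hm]
      · rcases pvScore_cases x with hx | hx | hx
        · -- x beats m (0 < 1)
          have hlt : pvScore x < pvScore m := by rw [hx, hm]; norm_num
          rw [if_pos hlt, ih x]
          all_goals simp [pvSelect, hx, hm, pvScan1_cons]
        · have hlt : ¬ pvScore x < pvScore m := by rw [hx, hm]; norm_num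
          rw [if_neg hlt, ih m]
          all_goals simp [pvSelect, hx, hm, pvScan1_cons]
        · have hlt : ¬ pvScore x < pvScore m := by rw [hx, hm]; norm_num
          rw [if_neg hlt, ih m]
          have hx0 : pvScore x ≠ 0 := by rw [hx]; norm_num
          all_goals simp [pvSelect, hx0, hm, pvScan1_cons]
      · rcases pvScore_cases x with hx | hx | hx
        · have hlt : pvScore x < pvScore m := by rw [hx, hm]; norm_num
          rw [if_pos hlt, ih x]
          all_goals simp [pvSelect, hx, hm, pvScan1_cons]
        · have hlt : pvScore x < pvScore m := by rw [hx, hm]; norm_num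
          rw [if_pos hlt, ih x]
          unfold pvSelect
          rcases h1 : pvScan1 t with _ | y <;>
            simp [hx, hm, pvScan1_cons, pvScan2_cons, h1]
        · have hlt : ¬ pvScore x < pvScore m := by rw [hx, hm]; norm_num
          rw [if_neg hlt, ih m]
          unfold pvSelect
          have hx1 : pvScore x ≠ 1 := by rw [hx]; norm_num
          have hx0 : pvScore x ≠ 0 := by rw [hx]; norm_num
          rcases h1 : pvScan1 t with _ | y <;>
            simp [hx0, hx1, hm, pvScan1_cons, pvScan2_cons, h1]

-- ===== VERDICT (by name: the statement is the Claim_ definition above) =====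
theorem pick_preferred_book_spec : Claim_equal_pick_preferred_book := by
  intro books _
  unfold Spec_pick_preferred_book pick_preferred_book pick_preferred_book_alt
  cases books with
  | nil => rfl
  | cons b t =>
      rw [min?_cons_select]
      unfold pvSelect
      by_cases h0 : pvScore b = 0
      · simp [pvScan1_cons, h0]
      · rw [pvScan1_cons]
        simp only [List.isEmpty_cons, Bool.false_eq_true, if_false, if_neg h0]
        rcases h1 : pvScan1 t with _ | y
        · by_cases hb1 : pvScore b = 1
          · simp [pvScan2_cons, hb1]
          · rw [pvScan2_cons]
            simp only [if_neg hb1]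
            rcases h2 : pvScan2 t with _ | z <;> simp
        · simp
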